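-- pv_equiv track=rewrite | github.com/maciekniewielki/AdventOfCode2024 | Python/day14/day14.py | detect_line_of_robots
-- ===== SOURCE A (Python) =====
-- WIDTH = 101
--
-- HEIGHT = 103
--
-- def detect_line_of_robots(robots):
--     positions = {robot[0] for robot in robots}
--     robots_in_a_row = 0
--     for x in range(WIDTH):
--         for y in range(HEIGHT):
--             if (x, y) in positions:
--                 robots_in_a_row += 1
--                 # Close enough for an image
--                 if robots_in_a_row > 15:
--                     return True
--             else:
--                 robots_in_a_row = 0
--     return False
-- ===== SOURCE B (Python) =====
-- WIDTH = 101
--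
-- HEIGHT = 103
--
-- def detect_line_of_robots(robots):
--     indices = sorted({x * HEIGHT + y for (x, y), _ in robots
--                       if 0 <= x < WIDTH and 0 <= y < HEIGHT})
--     prev = None
--     run = 0
--     for i in indices:
--         run = run + 1 if prev is not None and i == prev + 1 else 1
--         if run >= 16:
--             return True
--         prev = i
--     return False
-- ===== Notes on version B (the rewrite author's own statement) =====
-- stated objective: alternative
-- what changed: A scans all 101x103 grid cells with a nested loop against a position set; B instead sorts the deduplicated in-bounds scan indices x*HEIGHT+y and looks for 16 consecutive indices in one pass over the sorted list, so the work depends on the number of robots rather than on the grid size.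
import Mathlib
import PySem

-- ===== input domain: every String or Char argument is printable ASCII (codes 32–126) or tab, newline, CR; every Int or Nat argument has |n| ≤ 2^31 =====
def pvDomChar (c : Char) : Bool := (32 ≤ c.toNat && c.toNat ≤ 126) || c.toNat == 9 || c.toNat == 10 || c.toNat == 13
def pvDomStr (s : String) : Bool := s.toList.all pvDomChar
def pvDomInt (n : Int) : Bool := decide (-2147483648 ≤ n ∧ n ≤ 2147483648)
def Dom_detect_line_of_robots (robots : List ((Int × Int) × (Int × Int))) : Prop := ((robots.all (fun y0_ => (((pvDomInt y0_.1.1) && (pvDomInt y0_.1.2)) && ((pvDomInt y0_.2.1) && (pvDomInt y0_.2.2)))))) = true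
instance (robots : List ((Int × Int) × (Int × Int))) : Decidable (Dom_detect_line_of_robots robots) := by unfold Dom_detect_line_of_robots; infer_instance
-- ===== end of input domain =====

-- B replaces A's full 101×103 column-major grid scan by sorting the (deduplicated) in-bounds
-- scan indices x*HEIGHT+y and looking for a run of 16 consecutive indices; return value only.

-- ===== PORT A =====
-- inner loop 'for y in range(HEIGHT)': returns none on early 'return True', else the carried counter
def pyGoY (positions : PySem.Set (Int × Int)) (x : Int) (ys : List Int) (c : Int) : Option Int :=
  match ys with
  | [] => some c
  | y :: ys' =>
    if positions.contains (x, y) then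
      if c + 1 > 15 then none
      else pyGoY positions x ys' (c + 1)
    else pyGoY positions x ys' 0

-- outer loop 'for x in range(WIDTH)'
def pyGoX (positions : PySem.Set (Int × Int)) (xs : List Int) (c : Int) : Bool :=
  match xs with
  | [] => false
  | x :: xs' =>
    match pyGoY positions x (PySem.List.pyRange 0 103 1) c with
    | none => true
    | some c' => pyGoX positions xs' c'

def detect_line_of_robots (robots : List ((Int × Int) × (Int × Int))) : Bool :=
  let positions : PySem.Set (Int × Int) := PySem.Set.ofList (robots.map (fun r => r.1))
  pyGoX positions (PySem.List.pyRange 0 101 1) 0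

-- ===== PORT B =====
-- 'for i in indices' loop of Source B, carrying prev and run
def altScan (indices : List Int) (prev : Option Int) (run : Int) : Bool :=
  match indices with
  | [] => false
  | i :: rest =>
    let run' := if (match prev with | some p => i == p + 1 | none => false) then run + 1 else 1
    if run' ≥ 16 then true else altScan rest (some i) run'

def detect_line_of_robots_alt (robots : List ((Int × Int) × (Int × Int))) : Bool :=
  let indices : List Int :=
    PySem.List.sorted
      (PySem.Set.ofList
        ((robots.filter (fun r => decide (0 ≤ r.1.1 ∧ r.1.1 < 101 ∧ 0 ≤ r.1.2 ∧ r.1.2 < 103))).map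
          (fun r => r.1.1 * 103 + r.1.2)))
      (fun i => i) false
  altScan indices none 0

-- ===== PRECONDITION & SPEC =====
def Spec_detect_line_of_robots (robots : List ((Int × Int) × (Int × Int))) (out : Bool) : Prop := out = detect_line_of_robots_alt robots
instance (robots : List ((Int × Int) × (Int × Int))) (out : Bool) : Decidable (Spec_detect_line_of_robots robots out) := by unfold Spec_detect_line_of_robots; infer_instance

-- ===== CLAIM (what is proved, stated in full; the proofs are below) =====
def Claim_equal_detect_line_of_robots : Prop := ∀ (robots : List ((Int × Int) × (Int × Int))), Dom_detect_line_of_robots robots → Spec_detect_line_of_robots robots (detect_line_of_robots robots)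

-- ===== LEMMAS AND PROOFS =====

-- whether grid cell with column-major scan index n holds a robot
def memB (pos : PySem.Set (Int × Int)) (n : Nat) : Bool :=
  pos.contains (((n / 103 : Nat) : Int), ((n % 103 : Nat) : Int))

-- reference scan over the flat boolean grid: counter version, with early-true
def fRun (bs : List Bool) (c : Int) : Bool :=
  match bs with
  | [] => false
  | b :: bs' => if b then (if c + 1 > 15 then true else fRun bs' (c + 1)) else fRun bs' 0

-- one segment of the reference scan, returning the carried counter (none = found)
def fAux (bs : List Bool) (c : Int) : Option Int :=
  match bs with
  | [] => some c
  | b :: bs' => if b then (if c + 1 > 15 then none else fAux bs' (c + 1)) else fAux bs' 0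

lemma fRun_append (as bs : List Bool) (c : Int) :
    fRun (as ++ bs) c = match fAux as c with | none => true | some c' => fRun bs c' := by
  induction as generalizing c with
  | nil => simp [fAux]
  | cons b as ih =>
    by_cases hb : b <;> by_cases hc : c + 1 > 15 <;>
      simp [fAux, fRun, hb, hc, ih]

lemma pyGoY_eq_fAux (pos : PySem.Set (Int × Int)) (x : Int) (ys : List Int) (c : Int) :
    pyGoY pos x ys c = fAux (ys.map (fun y => pos.contains (x, y))) c := by
  induction ys generalizing c with
  | nil => rfl
  | cons y ys ih => by_cases hb : pos.contains (x, y) <;> simp [pyGoY, fAux, ih]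

lemma pyGoX_eq_fRun (pos : PySem.Set (Int × Int)) (xs : List Int) (c : Int) :
    pyGoX pos xs c =
      fRun (xs.flatMap (fun x => (PySem.List.pyRange 0 103 1).map (fun y => pos.contains (x, y)))) c := by
  induction xs generalizing c with
  | nil => rfl
  | cons x xs ih =>
    rw [List.flatMap_cons, fRun_append, pyGoX, pyGoY_eq_fAux]
    cases fAux ((PySem.List.pyRange 0 103 1).map (fun y => pos.contains (x, y))) c <;> simp [ih]

-- the column of cell booleans of column x is a segment of the flat grid
lemma col_eq (pos : PySem.Set (Int × Int)) (x : Nat) :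
    (PySem.List.pyRange 0 103 1).map (fun y => pos.contains ((x : Int), y))
      = (List.range' (x * 103) 103).map (memB pos) := by
  rw [PySem.List.pyRange_one, List.range'_eq_map_range]
  simp only [List.map_map]
  apply List.map_congr_left
  intro k hk
  rw [List.mem_range] at hk
  have h1 : (x * 103 + k) / 103 = x := by omega
  have h2 : (x * 103 + k) % 103 = k := by omega
  simp [memB, Function.comp, h1, h2]

lemma flatten_range' (n : Nat) :
    (List.range n).flatMap (fun x => List.range' (x * 103) 103) = List.range' 0 (n * 103) := by
  induction n with
  | zero => rfl
  | succ n ih =>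
    rw [List.range_succ, List.flatMap_append, ih, List.flatMap_singleton]
    have h := List.range'_append_1 (s := 0) (m := n * 103) (n := 103)
    simpa [Nat.succ_mul] using h

-- A-side: the flattened grid traversal is the flat boolean list of all cells
lemma flat_eq (pos : PySem.Set (Int × Int)) :
    (PySem.List.pyRange 0 101 1).flatMap
        (fun x => (PySem.List.pyRange 0 103 1).map (fun y => pos.contains (x, y)))
      = (List.range' 0 10403).map (memB pos) := by
  rw [PySem.List.pyRange_one 0 101]
  rw [List.flatMap_map]
  have h101 : ((101 : Int) - 0).toNat = 101 := rfl
  rw [h101]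
  have hcols : ∀ x ∈ List.range 101,
      (PySem.List.pyRange 0 103 1).map (fun y => pos.contains ((0 : Int) + (x : Int), y))
        = (List.range' (x * 103) 103).map (memB pos) := by
    intro x _
    simpa using col_eq pos x
  rw [List.flatMap_congr hcols]
  rw [← List.map_flatMap, flatten_range' 101]

-- A-side: the whole double loop is the reference scan of the flat grid
lemma detect_eq_fRun (robots : List ((Int × Int) × (Int × Int))) :
    detect_line_of_robots robots
      = fRun ((List.range' 0 10403).map
          (memB (PySem.Set.ofList (robots.map (fun r => r.1))))) 0 := by
  unfold detect_line_of_robots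
  simp only [pyGoX_eq_fRun, flat_eq]

-- invariant tying A's counter to B's (prev, run) state at position a of the flat scan
def RunInv (a : Nat) (c : Int) (prev : Option Int) (run : Int) : Prop :=
  (c = 0 ∧ prev = none) ∨
  (∃ p : Nat, prev = some (p : Int) ∧ p + 1 < a ∧ c = 0) ∨
  (∃ p : Nat, prev = some (p : Int) ∧ p + 1 = a ∧ 0 < c ∧ run = c)

lemma altScan_eq_fRun (pos : PySem.Set (Int × Int)) (k : Nat) :
    ∀ (a : Nat) (c run : Int) (prev : Option Int), RunInv a c prev run →
      altScan (((List.range' a k).filter (memB pos)).map (fun n : Nat => (n : Int))) prev run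
        = fRun ((List.range' a k).map (memB pos)) c := by
  induction k with
  | zero => intros; rfl
  | succ k ih =>
    intro a c run prev hinv
    rw [List.range'_succ]
    by_cases hb : memB pos a
    · rw [List.filter_cons_of_pos hb, List.map_cons, List.map_cons, hb]
      rcases hinv with ⟨hc, hprev⟩ | ⟨p, hprev, hlt, hc⟩ | ⟨p, hprev, heq, hpos, hrun⟩
      · subst hc; subst hprev
        simp only [altScan, fRun, if_true]
        norm_num
        exact ih (a + 1) 1 1 (some (a : Int))
          (Or.inr (Or.inr ⟨a, rfl, rfl, by omega, rfl⟩))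
      · subst hc; subst hprev
        have hne : ((a : Nat) : Int) ≠ (p : Int) + 1 := by
          intro h; apply absurd h; omega
        simp only [altScan, fRun, if_true, beq_iff_eq, hne]
        norm_num
        exact ih (a + 1) 1 1 (some (a : Int))
          (Or.inr (Or.inr ⟨a, rfl, rfl, by omega, rfl⟩))
      · subst hprev
        rw [hrun]
        have heq' : ((a : Nat) : Int) = (p : Int) + 1 := by omega
        by_cases hth : (16 : Int) ≤ c + 1
        · simp only [altScan, fRun, beq_iff_eq, heq', if_true]
          rw [if_pos (by omega : c + 1 ≥ 16), if_pos (by omega : c + 1 > 15)]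
        · simp only [altScan, fRun, beq_iff_eq, heq', if_true]
          rw [if_neg (by omega : ¬ c + 1 ≥ 16), if_neg (by omega : ¬ c + 1 > 15)]
          exact ih (a + 1) (c + 1) (c + 1) (some ((p : Int) + 1))
            (Or.inr (Or.inr ⟨p + 1, by push_cast; rfl, by omega, by omega, rfl⟩))
    · rw [List.filter_cons_of_neg (by simpa using hb), List.map_cons]
      rw [show fRun (memB pos a :: (List.range' (a + 1) k).map (memB pos)) c
            = fRun ((List.range' (a + 1) k).map (memB pos)) 0 by
          simp [fRun, hb]]
      apply ih (a + 1) 0 run prev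
      rcases hinv with ⟨hc, hprev⟩ | ⟨p, hprev, hlt, hc⟩ | ⟨p, hprev, heq, hpos, hrun⟩
      · exact Or.inl ⟨rfl, hprev⟩
      · exact Or.inr (Or.inl ⟨p, hprev, by omega, rfl⟩)
      · exact Or.inr (Or.inl ⟨p, hprev, by omega, rfl⟩)

-- B-side: the sorted index set is exactly the filtered flat range
lemma indices_eq (robots : List ((Int × Int) × (Int × Int))) :
    PySem.List.sorted
      (PySem.Set.ofList
        ((robots.filter (fun r => decide (0 ≤ r.1.1 ∧ r.1.1 < 101 ∧ 0 ≤ r.1.2 ∧ r.1.2 < 103))).map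
          (fun r => r.1.1 * 103 + r.1.2)))
      (fun i => i) false
    = ((List.range' 0 10403).filter
        (memB (PySem.Set.ofList (robots.map (fun r => r.1))))).map (fun n : Nat => (n : Int)) := by
  apply PySem.List.sorted_eq_of_perm_of_pairwise_lt
  · refine (List.perm_ext_iff_of_nodup ?_ (PySem.Set.nodup_ofList _)).mpr ?_
    · exact (((List.pairwise_lt_range' ..).nodup).filter _).map (fun a b h => by exact_mod_cast h)
    · intro i
      simp only [List.mem_map, List.mem_filter, PySem.Set.mem_ofList, List.mem_range']
      constructor
      · rintro ⟨n, ⟨⟨j, hj, hn⟩, hmem⟩, rfl⟩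
        have hn' : n < 10403 := by omega
        unfold memB at hmem
        rw [PySem.Set.contains_iff, PySem.Set.mem_ofList, List.mem_map] at hmem
        obtain ⟨r, hr, hr1⟩ := hmem
        refine ⟨r, ⟨hr, ?_⟩, ?_⟩
        · simp only [decide_eq_true_eq, hr1]
          refine ⟨by positivity, by omega, by positivity, by omega⟩
        · rw [hr1]
          show ((n / 103 : Nat) : Int) * 103 + ((n % 103 : Nat) : Int) = (n : Int)
          omega
      · rintro ⟨r, ⟨hr, hcond⟩, rfl⟩
        simp only [decide_eq_true_eq] at hcond
        obtain ⟨hx0, hx1, hy0, hy1⟩ := hcond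
        refine ⟨r.1.1.toNat * 103 + r.1.2.toNat, ⟨⟨r.1.1.toNat * 103 + r.1.2.toNat, by omega, by omega⟩, ?_⟩, by omega⟩
        unfold memB
        rw [PySem.Set.contains_iff, PySem.Set.mem_ofList, List.mem_map]
        refine ⟨r, hr, ?_⟩
        have h1 : (r.1.1.toNat * 103 + r.1.2.toNat) / 103 = r.1.1.toNat := by omega
        have h2 : (r.1.1.toNat * 103 + r.1.2.toNat) % 103 = r.1.2.toNat := by omega
        rw [h1, h2, Int.toNat_of_nonneg hx0, Int.toNat_of_nonneg hy0]
  · exact List.Pairwise.map _ (fun a b h => by exact_mod_cast h)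
      ((List.pairwise_lt_range' ..).filter _)

-- ===== VERDICT (by name: the statement is the Claim_ definition above) =====
theorem detect_line_of_robots_spec : Claim_equal_detect_line_of_robots := by
  intro robots _
  unfold Spec_detect_line_of_robots
  rw [detect_eq_fRun, detect_line_of_robots_alt]
  rw [indices_eq]
  exact (altScan_eq_fRun _ 10403 0 0 0 none (Or.inl ⟨rfl, rfl⟩ : RunInv 0 0 none 0)).symm
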